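-- pv_equiv track=rewrite | github.com/zachpek/CS1010E | ET_09_T27.py | ds1
-- ===== SOURCE A (Python) =====
-- def ds1(aString, n):
--     d = {}
--     for c in aString:
--         d[c] = d.get(c, 0) + 1
--
--     result = []
--     for k, v in d.items():
--         if v == n:
--             result.append(k)
--
--     return result
-- ===== SOURCE B (Python) =====
-- def ds1(aString, n):
--     seen = set()
--     result = []
--     for c in aString:
--         if c not in seen:
--             seen.add(c)
--             if aString.count(c) == n:
--                 result.append(c)
--     return result
-- ===== Notes on version B (the rewrite author's own statement) =====
-- stated objective: idiomatic
-- what changed: B drops the frequency dict entirely: it walks the string once with a seen set and, for each first occurrence of a character, rescans the string via aString.count(c) to decide membership, preserving first-occurrence order.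
import Mathlib
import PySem

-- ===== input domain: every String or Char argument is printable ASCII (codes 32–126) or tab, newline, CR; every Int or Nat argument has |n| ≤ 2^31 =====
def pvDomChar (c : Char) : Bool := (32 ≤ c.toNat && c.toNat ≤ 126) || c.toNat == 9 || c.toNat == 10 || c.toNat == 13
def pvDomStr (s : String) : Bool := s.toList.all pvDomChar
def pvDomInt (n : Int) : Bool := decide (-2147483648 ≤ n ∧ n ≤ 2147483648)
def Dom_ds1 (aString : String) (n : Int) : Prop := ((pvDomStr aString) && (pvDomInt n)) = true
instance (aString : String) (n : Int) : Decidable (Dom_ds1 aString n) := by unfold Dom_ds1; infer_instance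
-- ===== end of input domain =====

-- B drops A's frequency dict: one pass with a seen set, re-counting each first-seen
-- character with aString.count(c) (idiomatic alternative; not faster).

-- ===== PORT A =====
def ds1 (aString : String) (n : Int) : List String :=
  let d : PySem.Dict Char Int :=
    aString.toList.foldl (fun d c => d.insert c (d.getD c 0 + 1)) PySem.Dict.empty
  d.items.foldl (fun result kv => if kv.2 == n then result ++ [String.ofList [kv.1]] else result) []

-- ===== PORT B =====
def ds1_alt (aString : String) (n : Int) : List String :=
  (aString.toList.foldl
    (fun st c =>
      if PySem.Set.contains st.1 c then st
      else (PySem.Set.add st.1 c,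
            if ((PySem.Str.count aString (String.ofList [c]) : Int) == n)
              then st.2 ++ [String.ofList [c]] else st.2))
    ((PySem.Set.empty : PySem.Set Char), ([] : List String))).2

-- ===== PRECONDITION & SPEC =====
def Spec_ds1 (aString : String) (n : Int) (out : List String) : Prop := out = ds1_alt aString n
instance (aString : String) (n : Int) (out : List String) : Decidable (Spec_ds1 aString n out) := by unfold Spec_ds1; infer_instance

-- ===== CLAIM (what is proved, stated in full; the proofs are below) =====
def Claim_equal_ds1 : Prop := ∀ (aString : String) (n : Int), Dom_ds1 aString n → Spec_ds1 aString n (ds1 aString n)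

-- ===== LEMMAS AND PROOFS =====

-- Chars.count with a single-character needle is List.count (fuel-indexed helper first).
theorem pvGoSingle (c : Char) : ∀ (fuel : Nat) (s : List Char) (acc : Nat), s.length ≤ fuel →
    PySem.Chars.count.go [c] fuel s acc = acc + s.count c := by
  intro fuel
  induction fuel with
  | zero =>
    intro s acc h
    cases s with
    | nil => simp [PySem.Chars.count.go]
    | cons a t => simp at h
  | succ n ih =>
    intro s acc h
    cases s with
    | nil => simp [PySem.Chars.count.go]
    | cons a t =>
      simp only [PySem.Chars.count.go, List.isPrefixOf, List.count_cons]
      simp at h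
      by_cases hc : c = a
      · subst hc
        simp [ih t (acc + 1) h]
        omega
      · simp [hc, Ne.symm hc, ih t acc h]

theorem pvCountSingle (s : List Char) (c : Char) :
    PySem.Chars.count s [c] = s.count c := by
  simp [PySem.Chars.count, pvGoSingle]

-- The seen-set loop of B processes exactly the first occurrences: it equals a fold
-- over set(l) (first-occurrence dedup), skipping elements already in the initial seen set.
theorem pvSeenLoop (f : List String → Char → List String) (s : PySem.Set Char)
    (r : List String) (l : List Char) :
    l.foldl
      (fun st c =>
        if PySem.Set.contains st.1 c then st
        else (PySem.Set.add st.1 c, f st.2 c)) (s, r)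
    = (PySem.Set.update s l,
       (PySem.Set.ofList l).foldl
         (fun r c => if PySem.Set.contains s c then r else f r c) r) := by
  induction l using List.reverseRecOn with
  | nil => simp [PySem.Set.update]
  | append_singleton xs x ih =>
    rw [List.foldl_append, ih]
    simp only [List.foldl_cons, List.foldl_nil]
    rw [PySem.Set.ofList_append_singleton]
    by_cases hx : x ∈ xs
    · have hmem : x ∈ PySem.Set.update s xs := by
        rw [PySem.Set.mem_update]; exact Or.inr hx
      have hmem' : x ∈ PySem.Set.ofList xs := by
        rw [PySem.Set.mem_ofList]; exact hx
      rw [if_pos (by rw [PySem.Set.contains_iff]; exact hmem)]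
      rw [PySem.Set.add_of_mem hmem']
      rw [PySem.Set.update_append, PySem.Set.update_cons, PySem.Set.update_nil,
          PySem.Set.add_of_mem hmem]
    · have hnotof : x ∉ PySem.Set.ofList xs := by
        rw [PySem.Set.mem_ofList]; exact hx
      rw [PySem.Set.add_of_not_mem hnotof, List.foldl_append]
      simp only [List.foldl_cons, List.foldl_nil]
      by_cases hs : x ∈ s
      · have hmem : x ∈ PySem.Set.update s xs := by
          rw [PySem.Set.mem_update]; exact Or.inl hs
        rw [if_pos (by rw [PySem.Set.contains_iff]; exact hmem)]
        rw [if_pos (by rw [PySem.Set.contains_iff]; exact hs)]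
        rw [PySem.Set.update_append, PySem.Set.update_cons, PySem.Set.update_nil,
            PySem.Set.add_of_mem hmem]
      · have hmem : x ∉ PySem.Set.update s xs := by
          rw [PySem.Set.mem_update]; push Not; exact ⟨hs, hx⟩
        rw [if_neg (by rw [PySem.Set.contains_iff]; exact hmem)]
        rw [if_neg (by rw [PySem.Set.contains_iff]; exact hs)]
        rw [PySem.Set.update_append, PySem.Set.update_cons, PySem.Set.update_nil]

-- ===== VERDICT (by name: the statement is the Claim_ definition above) =====
theorem ds1_spec : Claim_equal_ds1 := by
  intro aString n _
  unfold Spec_ds1 ds1 ds1_alt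
  -- A side: the counting loop is Counter, whose items are first-occurrence keys with counts
  simp only [PySem.Dict.foldl_insert_getD_add_one_eq_counter, PySem.Dict.items_counter,
      List.foldl_map]
  -- B side: the seen-set loop is a fold over the first-occurrence dedup
  rw [pvSeenLoop (f := fun r c =>
        if ((PySem.Str.count aString (String.ofList [c]) : Int) == n)
          then r ++ [String.ofList [c]] else r)]
  simp only [PySem.Set.empty]
  congr 1
  funext r c
  simp [PySem.Set.contains, PySem.Str.count_eq, pvCountSingle]
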